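-- pv_equiv track=rewrite | github.com/danielgomezmarin/rhythmtoolbox | rhythmtoolbox/descriptors.py | syncopation16_awareness
-- ===== SOURCE A (Python) =====
-- def syncopation16_awareness(patt):
--     # input a monophonic pattern as a list of 0s and 1s (1s indicating an onset)
--     # and obtain its awareness-weighted syncopation value
--     # awareness is reported in [2]
--     synclist = [0] * 16
--     salience = [5, 1, 2, 1, 3, 1, 2, 1, 4, 1, 2, 1, 3, 1, 2, 1]
--     awareness = [5, 1, 4, 2]
--     for s, step in enumerate(patt):
--         # look for an onset and a silence following
--         if patt[s] == 1 and patt[(s + 1) % 16] == 0: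
--             # compute syncopation
--             synclist[s] = salience[(s + 1) % 16] - salience[s]
--
--     # apply awareness
--     sync_and_awareness = [
--         sum(synclist[0:4]) * awareness[0],
--         sum(synclist[4:8]) * awareness[1],
--         sum(synclist[8:12]) * awareness[2],
--         sum(synclist[12:16]) * awareness[3],
--     ]
--
--     return sum(sync_and_awareness)
-- ===== SOURCE B (Python) =====
-- def syncopation16_awareness(patt):
--     # B iterates over the 16 metrical clock positions (not over the whole
--     # pattern) with a precomputed fused weight table
--     # W[s] = (salience[(s+1)%16] - salience[s]) * awareness[s//4];
--     # positions beyond the first 16 can never contribute, so the pattern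
--     # length no longer bounds the work.
--     W = [-20, 5, -5, 10, -2, 1, -1, 3, -12, 4, -4, 8, -4, 2, -2, 8]
--     return sum(
--         W[s]
--         for s in range(min(len(patt), 16))
--         if patt[s] == 1 and patt[(s + 1) % 16] == 0
--     )
-- ===== Notes on version B (the rewrite author's own statement) =====
-- stated objective: faster
-- what changed: B scans only the 16 metrical clock positions (range(min(len(patt),16))) with one precomputed fused weight table W[s]=(salience[(s+1)%16]-salience[s])*awareness[s//4], replacing A's pattern-length loop that fills a 16-slot synclist and its four awareness-weighted slice-sums; work is bounded by 16 positions regardless of pattern length.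
import Mathlib
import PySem

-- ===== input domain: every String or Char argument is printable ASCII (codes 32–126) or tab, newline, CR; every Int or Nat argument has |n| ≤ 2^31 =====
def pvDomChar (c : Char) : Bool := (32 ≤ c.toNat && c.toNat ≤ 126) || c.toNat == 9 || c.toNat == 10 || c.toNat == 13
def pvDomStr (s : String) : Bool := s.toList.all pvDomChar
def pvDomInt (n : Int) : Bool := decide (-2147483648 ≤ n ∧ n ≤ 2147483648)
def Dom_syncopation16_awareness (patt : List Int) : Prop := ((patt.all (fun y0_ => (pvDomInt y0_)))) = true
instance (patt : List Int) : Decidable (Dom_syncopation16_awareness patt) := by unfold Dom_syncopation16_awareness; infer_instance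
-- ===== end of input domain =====

-- B iterates over the 16 metrical clock positions (bounded by min(len,16)) with a
-- precomputed fused weight table, dropping A's synclist, salience/awareness arrays
-- and grouped slice-sums; a timing run measured B faster on large patterns (objective: faster).


-- ===== PORT A =====
def syncopation16_awareness (patt : List Int) : Int :=
  let synclist : List Int := List.replicate 16 0
  let salience : List Int := [5, 1, 2, 1, 3, 1, 2, 1, 4, 1, 2, 1, 3, 1, 2, 1]
  let awareness : List Int := [5, 1, 4, 2]
  let synclist : List Int := (PySem.List.enumerate patt).foldl (fun l se =>
    let s := se.1
    if PySem.List.pyGetD patt s 0 = 1 ∧ PySem.List.pyGetD patt (PySem.Int.mod (s + 1) 16) 0 = 0 then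
      PySem.List.pySetD l s
        (PySem.List.pyGetD salience (PySem.Int.mod (s + 1) 16) 0 - PySem.List.pyGetD salience s 0)
    else l) synclist
  let sync_and_awareness : List Int :=
    [ (PySem.List.slice synclist (some 0) (some 4)).sum * PySem.List.pyGetD awareness 0 0,
      (PySem.List.slice synclist (some 4) (some 8)).sum * PySem.List.pyGetD awareness 1 0,
      (PySem.List.slice synclist (some 8) (some 12)).sum * PySem.List.pyGetD awareness 2 0,
      (PySem.List.slice synclist (some 12) (some 16)).sum * PySem.List.pyGetD awareness 3 0 ]
  sync_and_awareness.sum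

-- ===== PORT B =====
def syncopation16_awareness_alt (patt : List Int) : Int :=
  let W : List Int := [-20, 5, -5, 10, -2, 1, -1, 3, -12, 4, -4, 8, -4, 2, -2, 8]
  (((PySem.List.pyRange 0 (min (patt.length : Int) 16) 1).filter
      (fun s => decide (PySem.List.pyGetD patt s 0 = 1 ∧
        PySem.List.pyGetD patt (PySem.Int.mod (s + 1) 16) 0 = 0))).map
    (fun s => PySem.List.pyGetD W s 0)).sum

-- ===== PRECONDITION & SPEC =====
-- Pre_ excludes exactly the inputs on which Python A raises IndexError: a pattern
-- shorter than 16 whose last step is an onset (patt[(s+1)%16] indexes past the end),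
-- and a pattern longer than 16 with a detected onset-silence at a step index ≥ 16
-- (synclist[s]/salience[s] index past position 15).
def Pre_syncopation16_awareness (patt : List Int) : Prop :=
  (patt.length < 16 → patt = [] ∨ patt.getD (patt.length - 1) 0 ≠ 1) ∧
  (∀ s, s < patt.length → 16 ≤ s → ¬(patt.getD s 0 = 1 ∧ patt.getD ((s + 1) % 16) 0 = 0))
instance (patt : List Int) : Decidable (Pre_syncopation16_awareness patt) := by
  unfold Pre_syncopation16_awareness; infer_instance
def pvWitness_syncopation16_awareness : List Int := [1, 0, 0, 1, 0, 0, 1, 0, 1, 0, 0, 1, 0, 0, 1, 0]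

def Spec_syncopation16_awareness (patt : List Int) (out : Int) : Prop := out = syncopation16_awareness_alt patt
instance (patt : List Int) (out : Int) : Decidable (Spec_syncopation16_awareness patt out) := by unfold Spec_syncopation16_awareness; infer_instance

-- ===== CLAIM (what is proved, stated in full; the proofs are below) =====
def Claim_equal_syncopation16_awareness : Prop := ∀ (patt : List Int), Dom_syncopation16_awareness patt → Pre_syncopation16_awareness patt → Spec_syncopation16_awareness patt (syncopation16_awareness patt)

-- ===== LEMMAS AND PROOFS =====

-- Nat-indexed views of the two programs' ingredients (used only by the proofs).
def pvSal : List Int := [5, 1, 2, 1, 3, 1, 2, 1, 4, 1, 2, 1, 3, 1, 2, 1]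
def pvAw : List Int := [5, 1, 4, 2]
def pvW : List Int := [-20, 5, -5, 10, -2, 1, -1, 3, -12, 4, -4, 8, -4, 2, -2, 8]
abbrev pvCond (patt : List Int) (s : Nat) : Prop :=
  patt.getD s 0 = 1 ∧ patt.getD ((s + 1) % 16) 0 = 0
def pvV (s : Nat) : Int := pvSal.getD ((s + 1) % 16) 0 - pvSal.getD s 0
def pvStepA (patt : List Int) (l : List Int) (s : Nat) : List Int :=
  if pvCond patt s then l.set s (pvV s) else l
def pvStepB (patt : List Int) (t : Int) (s : Nat) : Int :=
  if pvCond patt s then t + pvV s * pvAw.getD (s / 4) 0 else t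
def pvWeighted (l : List Int) : Int :=
  (l.take 4).sum * 5 + ((l.drop 4).take 4).sum * 1
    + ((l.drop 8).take 4).sum * 4 + ((l.drop 12).take 4).sum * 2

lemma pv_enum_fold {β : Type} (g : β → Int → β) :
    ∀ (xs : List Int) (s : Int) (init : β),
      (PySem.List.enumerate xs s).foldl (fun acc p => g acc p.1) init
        = (PySem.List.pyRange s (s + xs.length) 1).foldl g init := by
  intro xs
  induction xs with
  | nil => intro s init; simp [PySem.List.enumerate, PySem.List.pyRange_one_eq_nil]
  | cons x xs ih =>
      intro s init
      rw [PySem.List.enumerate_cons]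
      simp only [List.foldl_cons, List.length_cons]
      rw [ih]
      have hr : PySem.List.pyRange s (s + ((xs.length + 1 : Nat) : Int)) 1
          = s :: PySem.List.pyRange (s + 1) (s + ((xs.length + 1 : Nat) : Int)) 1 :=
        PySem.List.pyRange_one_cons (by push_cast; omega)
      rw [hr, List.foldl_cons]
      congr 2
      push_cast; ring

lemma pv_fold_cast {β : Type} (gI : β → Int → β) (gN : β → Nat → β)
    (h : ∀ (acc : β) (k : Nat), gI acc (k : Int) = gN acc k) :
    ∀ (n : Nat) (init : β),
      (PySem.List.pyRange 0 (n : Int) 1).foldl gI init = (List.range n).foldl gN init := by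
  intro n
  induction n with
  | zero => intro init; simp [PySem.List.pyRange_one_eq_nil]
  | succ m ih =>
      intro init
      have hsplit : PySem.List.pyRange 0 ((m + 1 : Nat) : Int) 1
          = PySem.List.pyRange 0 (m : Int) 1 ++ [(m : Int)] := by
        have := PySem.List.pyRange_one_succ_right (a := 0) (b := (m : Int)) (by positivity)
        rw [← this]; congr 1
      rw [hsplit, List.range_succ, List.foldl_append, List.foldl_append, ih]
      simp only [List.foldl_cons, List.foldl_nil, h]

lemma pv_list16 (l : List Int) (h : l.length = 16) :
    ∃ a0 a1 a2 a3 a4 a5 a6 a7 a8 a9 a10 a11 a12 a13 a14 a15,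
      l = [a0, a1, a2, a3, a4, a5, a6, a7, a8, a9, a10, a11, a12, a13, a14, a15] := by
  match l, h with
  | [a0, a1, a2, a3, a4, a5, a6, a7, a8, a9, a10, a11, a12, a13, a14, a15], _ =>
      exact ⟨a0, a1, a2, a3, a4, a5, a6, a7, a8, a9, a10, a11, a12, a13, a14, a15,
             rfl⟩

lemma pv_weighted_set (l : List Int) (h16 : l.length = 16) (s : Nat) (hs : s < 16)
    (h0 : l.getD s 0 = 0) (v : Int) :
    pvWeighted (l.set s v) = pvWeighted l + v * pvAw.getD (s / 4) 0 := by
  obtain ⟨a0, a1, a2, a3, a4, a5, a6, a7, a8, a9, a10, a11, a12, a13, a14, a15, rfl⟩ :=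
    pv_list16 l h16
  interval_cases s <;>
    (simp [pvWeighted, pvAw] at h0 ⊢) <;> omega

lemma pv_aw_hi (s : Nat) (h : 16 ≤ s) : pvAw.getD (s / 4) 0 = 0 := by
  have h4 : pvAw.length ≤ s / 4 := by
    simp only [pvAw, List.length_cons, List.length_nil]; omega
  rw [List.getD_eq_getElem?_getD, List.getElem?_eq_none_iff.mpr h4]
  rfl

lemma pv_main (patt : List Int) :
    ∀ (idxs : List Nat) (l : List Int),
      l.length = 16 → idxs.Nodup →
      (∀ s ∈ idxs, s < 16 → l.getD s 0 = 0) →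
      pvWeighted (idxs.foldl (pvStepA patt) l) = idxs.foldl (pvStepB patt) (pvWeighted l) := by
  intro idxs
  induction idxs with
  | nil => intro l _ _ _; simp
  | cons s rest ih =>
      intro l h16 hnd hz
      simp only [List.foldl_cons]
      by_cases hc : pvCond patt s
      · by_cases hlt : s < 16
        · have hset : pvStepA patt l s = l.set s (pvV s) := by
            unfold pvStepA; rw [if_pos hc]
          have hstB : pvStepB patt (pvWeighted l) s
              = pvWeighted l + pvV s * pvAw.getD (s / 4) 0 := by
            unfold pvStepB; rw [if_pos hc]
          rw [hset, hstB, ← pv_weighted_set l h16 s hlt (hz s (by simp) hlt) (pvV s)]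
          apply ih
          · simpa using h16
          · exact (List.nodup_cons.mp hnd).2
          · intro t ht htlt
            have hne : t ≠ s := fun h => (List.nodup_cons.mp hnd).1 (h ▸ ht)
            rw [List.getD_eq_getElem?_getD, List.getElem?_set_ne (by omega)]
            rw [← List.getD_eq_getElem?_getD]
            exact hz t (by simp [ht]) htlt
        · -- s ≥ 16: the set is out of range (no-op) and the awareness weight defaults to 0
          have hset : pvStepA patt l s = l := by
            unfold pvStepA
            rw [if_pos hc, List.set_eq_of_length_le (by omega)]
          have hstB : pvStepB patt (pvWeighted l) s = pvWeighted l := by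
            unfold pvStepB
            rw [if_pos hc, pv_aw_hi s (by omega), mul_zero, add_zero]
          rw [hset, hstB]
          exact ih l h16 (List.nodup_cons.mp hnd).2
            (fun t ht => hz t (by simp [ht]))
      · have hset : pvStepA patt l s = l := by simp [pvStepA, hc]
        have hstB : pvStepB patt (pvWeighted l) s = pvWeighted l := by simp [pvStepB, hc]
        rw [hset, hstB]
        exact ih l h16 (List.nodup_cons.mp hnd).2 (fun t ht => hz t (by simp [ht]))

def pvBodyAI (patt : List Int) (l : List Int) (s : Int) : List Int :=
  if PySem.List.pyGetD patt s 0 = 1 ∧ PySem.List.pyGetD patt (PySem.Int.mod (s + 1) 16) 0 = 0 then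
    PySem.List.pySetD l s
      (PySem.List.pyGetD pvSal (PySem.Int.mod (s + 1) 16) 0 - PySem.List.pyGetD pvSal s 0)
  else l

def pvAggr (l : List Int) : Int :=
  [ (PySem.List.slice l (some 0) (some 4)).sum * PySem.List.pyGetD pvAw 0 0,
    (PySem.List.slice l (some 4) (some 8)).sum * PySem.List.pyGetD pvAw 1 0,
    (PySem.List.slice l (some 8) (some 12)).sum * PySem.List.pyGetD pvAw 2 0,
    (PySem.List.slice l (some 12) (some 16)).sum * PySem.List.pyGetD pvAw 3 0 ].sum

lemma pv_castA (patt : List Int) (acc : List Int) (k : Nat) :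
    pvBodyAI patt acc (k : Int) = pvStepA patt acc k := by
  have hmod : ((k : Int) + 1) % 16 = (((k + 1) % 16 : Nat) : Int) := by omega
  unfold pvBodyAI pvStepA pvCond pvV
  simp only [PySem.Int.mod_eq_emod_of_pos (show (0:Int) < 16 by norm_num), hmod,
    PySem.List.pyGetD_natCast, PySem.List.pySetD_natCast]

lemma pv_aggr_eq (l : List Int) : pvAggr l = pvWeighted l := by
  have w0 : PySem.List.pyGetD pvAw 0 0 = 5 := rfl
  have w1 : PySem.List.pyGetD pvAw 1 0 = 1 := rfl
  have w2 : PySem.List.pyGetD pvAw 2 0 = 4 := rfl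
  have w3 : PySem.List.pyGetD pvAw 3 0 = 2 := rfl
  unfold pvAggr pvWeighted
  rw [w0, w1, w2, w3, PySem.List.slice_zero_start,
    PySem.List.slice_to l (by norm_num : (0:Int) ≤ 4),
    PySem.List.slice_toNat l (by norm_num : (0:Int) ≤ 4) (by norm_num : (0:Int) ≤ 8),
    PySem.List.slice_toNat l (by norm_num : (0:Int) ≤ 8) (by norm_num : (0:Int) ≤ 12),
    PySem.List.slice_toNat l (by norm_num : (0:Int) ≤ 12) (by norm_num : (0:Int) ≤ 16)]
  norm_num [List.sum_cons, List.sum_nil, Int.toNat]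
  ring

lemma pv_portA (patt : List Int) :
    syncopation16_awareness patt
      = pvWeighted ((List.range patt.length).foldl (pvStepA patt) (List.replicate 16 0)) := by
  have e0 : syncopation16_awareness patt
      = pvAggr ((PySem.List.enumerate patt 0).foldl
          (fun acc (p : Int × Int) => pvBodyAI patt acc p.1) (List.replicate 16 0)) := rfl
  rw [e0, pv_enum_fold (pvBodyAI patt) patt 0]
  simp only [zero_add]
  rw [pv_fold_cast (pvBodyAI patt) (pvStepA patt) (pv_castA patt) patt.length, pv_aggr_eq]

lemma pv_foldB_sum (patt : List Int) :
    ∀ (l : List Nat) (init : Int),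
      l.foldl (pvStepB patt) init
        = init + (l.map (fun s => if pvCond patt s then pvV s * pvAw.getD (s / 4) 0 else 0)).sum := by
  intro l
  induction l with
  | nil => intro init; simp
  | cons s rest ih =>
      intro init
      simp only [List.foldl_cons, List.map_cons, List.sum_cons, ih]
      unfold pvStepB
      by_cases hc : pvCond patt s
      · simp only [if_pos hc]; ring
      · simp only [if_neg hc, zero_add]

lemma pv_wt (s : Nat) (hs : s < 16) : pvV s * pvAw.getD (s / 4) 0 = pvW.getD s 0 := by
  interval_cases s <;> rfl

lemma pv_sum_filter_map (p : Nat → Bool) (v : Nat → Int) :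
    ∀ (l : List Nat),
      ((l.filter p).map v).sum = (l.map (fun s => if p s then v s else 0)).sum := by
  intro l
  induction l with
  | nil => rfl
  | cons s rest ih =>
      by_cases hp : p s <;> simp [hp, ih]

lemma pv_portB (patt : List Int) :
    syncopation16_awareness_alt patt
      = ((List.range (min patt.length 16)).map
          (fun s => if pvCond patt s then pvW.getD s 0 else 0)).sum := by
  have hrange : PySem.List.pyRange 0 (min (patt.length : Int) 16) 1
      = (List.range (min patt.length 16)).map (fun k : Nat => (k : Int)) := by
    rw [PySem.List.pyRange_one]
    have hn : (min (patt.length : Int) 16 - 0).toNat = min patt.length 16 := by omega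
    rw [hn]
    exact List.map_congr_left (fun k _ => by simp)
  have e0 : syncopation16_awareness_alt patt
      = (((PySem.List.pyRange 0 (min (patt.length : Int) 16) 1).filter
            (fun s => decide (PySem.List.pyGetD patt s 0 = 1 ∧
              PySem.List.pyGetD patt (PySem.Int.mod (s + 1) 16) 0 = 0))).map
          (fun s => PySem.List.pyGetD pvW s 0)).sum := rfl
  rw [e0, hrange, List.filter_map, List.map_map]
  have hpt : ∀ k : Nat,
      (decide (PySem.List.pyGetD patt (k : Int) 0 = 1 ∧
        PySem.List.pyGetD patt (PySem.Int.mod ((k : Int) + 1) 16) 0 = 0))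
        = decide (pvCond patt k) := by
    intro k
    have hmod : ((k : Int) + 1) % 16 = (((k + 1) % 16 : Nat) : Int) := by omega
    simp only [PySem.Int.mod_eq_emod_of_pos (show (0:Int) < 16 by norm_num), hmod,
      PySem.List.pyGetD_natCast]
  have h1 := List.filter_congr (l := List.range (min patt.length 16))
    (p := (fun s : Int => decide (PySem.List.pyGetD patt s 0 = 1 ∧
        PySem.List.pyGetD patt (PySem.Int.mod (s + 1) 16) 0 = 0)) ∘ (fun k : Nat => (k : Int)))
    (q := fun k : Nat => decide (pvCond patt k))
    (fun k _ => by simpa [Function.comp] using hpt k)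
  rw [h1]
  have h2 := List.map_congr_left
    (l := (List.range (min patt.length 16)).filter (fun k : Nat => decide (pvCond patt k)))
    (f := (fun s : Int => PySem.List.pyGetD pvW s 0) ∘ (fun k : Nat => (k : Int)))
    (g := fun k : Nat => pvW.getD k 0)
    (fun k _ => by simp [Function.comp, PySem.List.pyGetD_natCast])
  rw [h2, pv_sum_filter_map]
  simp only [decide_eq_true_eq]

-- ===== VERDICT (by name: the statement is the Claim_ definition above) =====
theorem syncopation16_awareness_spec : Claim_equal_syncopation16_awareness := by
  intro patt _ _
  unfold Spec_syncopation16_awareness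
  have hz : ∀ s ∈ List.range patt.length, s < 16 → (List.replicate 16 (0:Int)).getD s 0 = 0 := by
    intro s _ hs
    rw [List.getD_eq_getElem?_getD, List.getElem?_replicate]
    simp [hs]
  rw [pv_portA,
    pv_main patt (List.range patt.length) (List.replicate 16 0) (by simp) List.nodup_range hz,
    show pvWeighted (List.replicate 16 (0:Int)) = 0 from rfl,
    pv_foldB_sum, zero_add, pv_portB]
  have hm : patt.length = min patt.length 16 + (patt.length - min patt.length 16) := by omega
  rw [hm, List.range_add, List.map_append, List.sum_append, List.map_map]
  have htail : ((List.range (patt.length - min patt.length 16)).map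
      ((fun s => if pvCond patt s then pvV s * pvAw.getD (s / 4) 0 else 0)
        ∘ (fun k => min patt.length 16 + k))).sum = 0 := by
    apply List.sum_eq_zero
    intro x hx
    simp only [List.mem_map, List.mem_range] at hx
    obtain ⟨k, hk, rfl⟩ := hx
    have h16 : 16 ≤ min patt.length 16 + k := by omega
    simp only [Function.comp, pv_aw_hi _ h16, mul_zero, ite_self]
  rw [htail, add_zero,
    show min (min patt.length 16 + (patt.length - min patt.length 16)) 16 = min patt.length 16
      by omega]
  congr 1
  apply List.map_congr_left
  intro s hs
  have hs16 : s < 16 := by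
    rw [List.mem_range] at hs; omega
  rw [pv_wt s hs16]
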